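-- pv_equiv track=rewrite | github.com/woo00oo/codingtest_study | 프로그래머스/110 옮기기.py | solution
-- ===== SOURCE A (Python) =====
-- from collections import deque
--
-- def solution(s):
--     answer = []
--     for string in s:
--         stack = []
--         count = 0
--         for str in string:
--
--             # 문자열이 0이면
--             if str == '0':
--
--                 # 앞에 2개가 1, 1인지 확인
--                 if stack[-2:] == ['1', '1']:
--                     count += 1
--                     stack.pop()
--                     stack.pop()
--
--                 # 앞에 2개가 1, 1이 아니면 그냥 0을 추가
--                 else:
--                     stack.append(str)
--
--             # 문자열이 0이 아니면 그냥 추가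
--             else:
--                 stack.append(str)
--
--         # 110이 없기 때문에 변화 불가능
--         if count == 0:
--             answer.append(string)
--
--         # 110이 있다면
--         else:
--             final = deque()
--
--             # 0이 나오기 전까지는 append
--             while stack:
--                 if stack[-1] == '1':
--                     final.append(stack.pop())
--                 elif stack[-1] == '0':
--                     break
--
--             # 0이 나왔다면 110을 주어진 count만큼 append
--             while count > 0:
--                 final.appendleft('0')
--                 final.appendleft('1')
--                 final.appendleft('1')
--                 count -= 1
--
--             # stack에 남아있는거 다 추가
--             while stack:
--                 final.appendleft(stack.pop())
--             answer.append(''.join(final))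
--
--     return answer
-- ===== SOURCE B (Python) =====
-- def _move110(t):
--     # No stack: a run-length counter of pending trailing '1's, an append-only
--     # buffer, and a removal count; "110" removals become run -= 2.
--     out = []
--     run = 0
--     count = 0
--     for ch in t:
--         if ch == '1':
--             run += 1
--         elif ch == '0' and run >= 2:
--             run -= 2
--             count += 1
--         else:
--             out.append('1' * run)
--             out.append(ch)
--             run = 0
--     if count == 0:
--         return t
--     return ''.join(out) + '110' * count + '1' * run
--
--
-- def solution(s):
--     return [_move110(t) for t in s]
-- ===== Notes on version B (the rewrite author's own statement) =====
-- stated objective: alternative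
-- what changed: B drops A's stack (push/pop with suffix comparisons) and deque entirely: one pass keeps a run-length counter of pending trailing '1's and an append-only buffer, a '110' removal becoming run -= 2, and the answer is rebuilt by plain concatenation buffer + '110'*count + '1'*run.
-- outside the precondition, e.g. on solution(['110a0']): A returns ['a0110'], B returns ['a0110']
import Mathlib
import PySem

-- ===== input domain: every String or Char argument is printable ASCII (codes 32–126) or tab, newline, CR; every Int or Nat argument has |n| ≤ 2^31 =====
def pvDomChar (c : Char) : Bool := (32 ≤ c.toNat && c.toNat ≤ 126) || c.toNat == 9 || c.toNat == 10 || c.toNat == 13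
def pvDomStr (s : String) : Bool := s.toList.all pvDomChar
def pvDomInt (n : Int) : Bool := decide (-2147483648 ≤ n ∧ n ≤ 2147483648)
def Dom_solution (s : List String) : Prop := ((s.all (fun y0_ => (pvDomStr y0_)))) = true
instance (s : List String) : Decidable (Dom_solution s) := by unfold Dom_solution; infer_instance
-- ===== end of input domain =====

-- B replaces A's stack-and-deque algorithm by a single pass that keeps a run-length
-- counter of pending trailing '1's and an append-only buffer; objective: alternative.


-- ===== PORT A =====
-- stack held in reverse (Python appends/pops at the right end); stack[-2:] == ['1','1']
-- is 'the two topmost entries are both 1', i.e. take 2 of the reversed stack = ['1','1'].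
def pvStackA (acc : List Char × Nat) (ch : Char) : List Char × Nat :=
  if ch = '0' then
    if acc.1.take 2 = ['1', '1'] then (acc.1.drop 2, acc.2 + 1)
    else (ch :: acc.1, acc.2)
  else (ch :: acc.1, acc.2)

-- A's first while-loop: pop '1's into final, break on '0'.  (On a stack top that is
-- neither '0' nor '1' the Python loop never terminates; such inputs are outside
-- Pre_solution, where this port simply stops — exact on Pre_solution.)
def pvPopOnesA : List Char → List Char × List Char
  | [] => ([], [])
  | c :: rest =>
      if c = '1' then
        let p := pvPopOnesA rest
        ('1' :: p.1, p.2)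
      else ([], c :: rest)

-- A's second while-loop: appendleft '0','1','1' count times prepends "110"*count.
def pv110A : Nat → List Char
  | 0 => []
  | n + 1 => '1' :: '1' :: '0' :: pv110A n

def solution (s : List String) : List String :=
  s.foldl (fun answer string =>
    let sc := string.toList.foldl pvStackA ([], 0)
    if sc.2 = 0 then answer ++ [string]
    else
      let pr := pvPopOnesA sc.1
      -- third while-loop prepends the remaining stack bottom-to-top, i.e. pr.2.reverse
      answer ++ [String.mk (pr.2.reverse ++ pv110A sc.2 ++ pr.1)]) []

-- ===== PORT B =====
-- state (out, run, count): append-only buffer, pending trailing '1's, removals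
def pvStepB (acc : List Char × Nat × Nat) (ch : Char) : List Char × Nat × Nat :=
  if ch = '1' then (acc.1, acc.2.1 + 1, acc.2.2)
  else if ch = '0' ∧ 2 ≤ acc.2.1 then (acc.1, acc.2.1 - 2, acc.2.2 + 1)
  else (acc.1 ++ List.replicate acc.2.1 '1' ++ [ch], 0, acc.2.2)

-- '110' * count
def pvTiles : Nat → List Char
  | 0 => []
  | n + 1 => '1' :: '1' :: '0' :: pvTiles n

def pvMove (t : String) : String :=
  let r := t.toList.foldl pvStepB ([], 0, 0)
  if r.2.2 = 0 then t
  else String.mk (r.1 ++ pvTiles r.2.2 ++ List.replicate r.2.1 '1')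

def solution_alt (s : List String) : List String := s.map pvMove

-- ===== PRECONDITION & SPEC =====
-- Python A's reconstruction loop spins forever when a reduced string still containing a
-- character other than '0'/'1' is scanned before a '0' is reached; Pre_ conservatively
-- excludes every string that contains "110" (so count > 0) together with a non-binary
-- character.  On some such inputs A still returns (see the cite ['110a0']); on others
-- (e.g. ['110a']) it diverges.
def Pre_solution (s : List String) : Prop :=
  (s.all (fun t => t.toList.all (fun c => c == '0' || c == '1') ||
    (List.range t.toList.length).all
      (fun i => !((t.toList.drop i).take 3 == ['1', '1', '0'])))) = true
instance (s : List String) : Decidable (Pre_solution s) := by unfold Pre_solution; infer_instance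

def pvWitness_solution : List String := ["110", "01"]

def Spec_solution (s : List String) (out : List String) : Prop := out = solution_alt s
instance (s : List String) (out : List String) : Decidable (Spec_solution s out) := by unfold Spec_solution; infer_instance

-- ===== CLAIM (what is proved, stated in full; the proofs are below) =====
def Claim_equal_solution : Prop := ∀ (s : List String), Dom_solution s → Pre_solution s → Spec_solution s (solution s)

-- ===== LEMMAS AND PROOFS =====

-- relation between A's state (reversed stack, count) and B's state (out, run, count):
-- the stack is run '1's on top of out reversed, and out never ends in '1'.
def pvRel (st : List Char × Nat) (b : List Char × Nat × Nat) : Prop :=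
  st.1 = List.replicate b.2.1 '1' ++ b.1.reverse ∧ st.2 = b.2.2 ∧
    (∀ c, b.1.reverse.head? = some c → c ≠ '1')

theorem pvRel_step (st : List Char × Nat) (b : List Char × Nat × Nat) (ch : Char)
    (h : pvRel st b) : pvRel (pvStackA st ch) (pvStepB b ch) := by
  obtain ⟨h1, h2, h3⟩ := h
  obtain ⟨out, run, count⟩ := b
  by_cases hc1 : ch = '1'
  · subst hc1
    refine ⟨?_, ?_, h3⟩ <;>
      simp [pvStackA, pvStepB, h1, h2, List.replicate_succ]
  · by_cases hc0 : ch = '0'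
    · subst hc0
      by_cases hr : 2 ≤ run
      · -- removal case: stack top is '1','1'
        obtain ⟨k, hk⟩ : ∃ k, run = k + 2 := ⟨run - 2, by omega⟩
        subst hk
        refine ⟨?_, ?_, h3⟩ <;>
          simp [pvStackA, pvStepB, h1, h2, List.replicate_succ]
      · -- run < 2 : A's take-2 test fails, both push '0'
        have htake : ¬ (st.1.take 2 = ['1', '1']) := by
          intro hT
          rw [h1] at hT
          interval_cases run
          · simp only [List.replicate, List.nil_append] at hT
            rcases hrev : out.reverse with _ | ⟨a, rest⟩
            · rw [hrev] at hT; simp at hT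
            · rw [hrev] at hT
              have ha : a = '1' := by rcases rest <;> simp_all
              exact h3 a (by simp [hrev]) ha
          · simp only [List.replicate, List.nil_append, List.cons_append, List.take] at hT
            rcases hrev : out.reverse with _ | ⟨a, rest⟩
            · rw [hrev] at hT; simp at hT
            · rw [hrev] at hT
              have ha : a = '1' := by simp_all
              exact h3 a (by simp [hrev]) ha
        refine ⟨?_, ?_, ?_⟩
        · simp only [pvStackA, pvStepB, if_neg htake]
          simp [h1, hr]
        · simp [pvStackA, pvStepB, htake, hr, h2]
        · intro c hcod
          simp [pvStepB, hr] at hcod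
          subst hcod; decide
    · -- other char: A pushes, B flushes
      refine ⟨?_, ?_, ?_⟩
      · simp [pvStackA, pvStepB, hc1, hc0, h1]
      · simp [pvStackA, pvStepB, hc1, hc0, h2]
      · intro c hcod
        simp [pvStepB, hc1, hc0] at hcod
        subst hcod; exact hc1

theorem pvRel_foldl (cs : List Char) (st : List Char × Nat) (b : List Char × Nat × Nat)
    (h : pvRel st b) : pvRel (cs.foldl pvStackA st) (cs.foldl pvStepB b) := by
  induction cs generalizing st b with
  | nil => exact h
  | cons c rest ih => exact ih _ _ (pvRel_step st b c h)

theorem pvTiles_eq (n : Nat) : pv110A n = pvTiles n := by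
  induction n with
  | zero => rfl
  | succ k ih => simp [pv110A, pvTiles, ih]

-- pop-ones on 'run ones on top of l' where l does not start with '1'
theorem pvPopOnes_replicate (run : Nat) (l : List Char)
    (hl : ∀ c, l.head? = some c → c ≠ '1') :
    pvPopOnesA (List.replicate run '1' ++ l) = (List.replicate run '1', l) := by
  induction run with
  | zero =>
      rcases l with _ | ⟨a, rest⟩
      · rfl
      · have := hl a rfl
        simp [pvPopOnesA, this]
  | succ k ih => simp [List.replicate_succ, pvPopOnesA, ih]

theorem move_eq (t : String) :
    (let sc := t.toList.foldl pvStackA ([], 0)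
     if sc.2 = 0 then t
     else
       let pr := pvPopOnesA sc.1
       String.mk (pr.2.reverse ++ pv110A sc.2 ++ pr.1)) = pvMove t := by
  have hrel : pvRel (t.toList.foldl pvStackA ([], 0)) (t.toList.foldl pvStepB ([], 0, 0)) :=
    pvRel_foldl _ _ _ ⟨by simp, rfl, by simp⟩
  obtain ⟨h1, h2, h3⟩ := hrel
  unfold pvMove
  set r := t.toList.foldl pvStepB ([], 0, 0) with hr
  by_cases h0 : r.2.2 = 0
  · simp [h0, h2]
  · have hpop := pvPopOnes_replicate r.2.1 r.1.reverse h3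
    simp only [h2, h0, if_false, h1, hpop, pvTiles_eq, List.reverse_reverse]

theorem foldl_append_map (f : String → String) (l : List String) (acc : List String) :
    l.foldl (fun a x => a ++ [f x]) acc = acc ++ l.map f := by
  induction l generalizing acc with
  | nil => simp
  | cons x xs ih => simp [List.foldl, ih]

-- ===== VERDICT (by name: the statement is the Claim_ definition above) =====
theorem solution_spec : Claim_equal_solution := by
  intro s _ _
  show solution s = solution_alt s
  unfold solution solution_alt
  have hb : (fun (answer : List String) (string : String) =>
      let sc := string.toList.foldl pvStackA ([], 0)
      if sc.2 = 0 then answer ++ [string]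
      else
        let pr := pvPopOnesA sc.1
        answer ++ [String.mk (pr.2.reverse ++ pv110A sc.2 ++ pr.1)])
      = (fun (a : List String) (x : String) => a ++ [pvMove x]) := by
    funext answer string
    have := move_eq string
    by_cases h0 : (string.toList.foldl pvStackA ([], 0)).2 = 0 <;>
      simp only [h0, if_true, if_false] at this ⊢ <;>
      rw [← this]
  rw [hb, foldl_append_map]
  simp
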